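-- pv_equiv track=rewrite | github.com/ricebci/lfadsci | build/lib/lfadsci/shared_utils.py | make_condition_groups
-- ===== SOURCE A (Python) =====
-- def make_condition_groups(delays_trials, cues_trials):
--     delays_trials_str = [str(i)[1:-1] for i in delays_trials]
--     cues_trials_str = [str(i)[1:-1] for i in cues_trials]
--     delays_trials_unique = set(delays_trials_str)
--
--     condition_groups = {}
--     for idelay_cond in delays_trials_unique:
--         condition_groups.update({idelay_cond: {}})
--         for itrial in range(len(delays_trials_str)):
--             if delays_trials_str[itrial] == idelay_cond:
--                 if cues_trials_str[itrial] not in condition_groups[idelay_cond].keys():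
--                     condition_groups[idelay_cond].update({cues_trials_str[itrial]: []})
--                 condition_groups[idelay_cond][cues_trials_str[itrial]] += [itrial]
--
--     return condition_groups
-- ===== SOURCE B (Python) =====
-- # Single pass over the trials: each trial index is appended straight into its
-- # (delay, cue) bucket, instead of scanning all trials once per unique delay key.
-- def make_condition_groups(delays_trials, cues_trials):
--     groups = {}
--     for itrial, (d, c) in enumerate(zip(delays_trials, cues_trials)):
--         dk = ", ".join(map(str, d))
--         ck = ", ".join(map(str, c))
--         groups.setdefault(dk, {}).setdefault(ck, []).append(itrial)
--     return groups
-- ===== Notes on version B (the rewrite author's own statement) =====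
-- stated objective: alternative
-- what changed: Replaces A's loop over the set of unique delay keys with a full rescan of all trials per key by a single pass over enumerate(zip(...)) that appends each trial index directly into its (delay, cue) bucket, building the keys with ', '.join(map(str, ...)) instead of slicing str(list).
import Mathlib
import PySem

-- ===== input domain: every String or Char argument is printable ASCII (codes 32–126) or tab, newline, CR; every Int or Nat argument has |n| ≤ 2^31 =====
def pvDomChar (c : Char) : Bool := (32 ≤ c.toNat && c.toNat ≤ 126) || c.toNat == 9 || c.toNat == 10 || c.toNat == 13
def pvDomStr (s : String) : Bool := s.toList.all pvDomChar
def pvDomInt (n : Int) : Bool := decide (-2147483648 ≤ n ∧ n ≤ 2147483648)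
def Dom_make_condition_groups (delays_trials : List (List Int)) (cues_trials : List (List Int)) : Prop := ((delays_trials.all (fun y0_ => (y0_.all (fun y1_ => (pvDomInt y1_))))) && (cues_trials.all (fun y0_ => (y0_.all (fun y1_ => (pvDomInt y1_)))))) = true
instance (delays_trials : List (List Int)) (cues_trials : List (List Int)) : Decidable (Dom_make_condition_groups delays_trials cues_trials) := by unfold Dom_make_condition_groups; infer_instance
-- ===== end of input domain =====

-- B replaces A's per-unique-delay-key rescan of all trials by a single pass that
-- appends each trial index directly into its (delay, cue) bucket.
-- Python A iterates the set of delay keys in hash order; the port iterates it in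
-- first-insertion order (dict outputs are compared ignoring key order).

-- ===== PORT A =====
-- str(l) for a Python list of ints: "[" + ", ".join(str(x) for x in l) + "]"  (exact)
def pyStrIntList (l : List Int) : String :=
  PySem.Str.join "" ["[", PySem.Str.join ", " (l.map PySem.Int.toStr), "]"]

-- str(i)[1:-1], as A computes each key
def akey (l : List Int) : String := PySem.Str.slice (pyStrIntList l) (some 1) (some (-1))

-- the body of A's inner 'for itrial in range(len(delays_trials_str))' loop, verbatim
def innerBody (delays_trials_str cues_trials_str : List String) (idelay_cond : String)
    (cg : PySem.Dict String (PySem.Dict String (List Int))) (itrial : Int) :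
    PySem.Dict String (PySem.Dict String (List Int)) :=
  if PySem.List.pyGetD delays_trials_str itrial "" == idelay_cond then
    let cue := PySem.List.pyGetD cues_trials_str itrial ""
    let inner := cg.getD idelay_cond PySem.Dict.empty
    let inner := if inner.contains cue then inner else inner.insert cue ([] : List Int)
    cg.insert idelay_cond (inner.insert cue (inner.getD cue [] ++ [itrial]))
  else cg

def make_condition_groups (delays_trials : List (List Int)) (cues_trials : List (List Int)) : List (String × List (String × List Int)) :=
  let delays_trials_str := delays_trials.map (fun i => akey i)
  let cues_trials_str := cues_trials.map (fun i => akey i)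
  let delays_trials_unique : PySem.Set String := PySem.Set.ofList delays_trials_str
  let condition_groups : PySem.Dict String (PySem.Dict String (List Int)) :=
    delays_trials_unique.foldl (fun cg idelay_cond =>
      (PySem.List.pyRange 0 (delays_trials_str.length : Int) 1).foldl
        (innerBody delays_trials_str cues_trials_str idelay_cond)
        (cg.insert idelay_cond PySem.Dict.empty)) PySem.Dict.empty
  condition_groups.items.map (fun p => (p.1, p.2.items))

-- ===== PORT B =====
-- ", ".join(map(str, l))
def bkey (l : List Int) : String := PySem.Str.join ", " (l.map PySem.Int.toStr)

def make_condition_groups_alt (delays_trials : List (List Int)) (cues_trials : List (List Int)) : List (String × List (String × List Int)) :=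
  let groups : PySem.Dict String (PySem.Dict String (List Int)) :=
    (PySem.List.enumerate (delays_trials.zip cues_trials)).foldl (fun g p =>
      g.modify (bkey p.2.1) PySem.Dict.empty
        (fun inner => inner.modify (bkey p.2.2) [] (fun lst => lst ++ [p.1])))
      PySem.Dict.empty
  groups.items.map (fun p => (p.1, p.2.items))

-- ===== PRECONDITION & SPEC =====
-- Pre_ excludes exactly the inputs with more delay rows than cue rows, on which A raises
-- IndexError (cues_trials_str[itrial] past the end).
def Pre_make_condition_groups (delays_trials : List (List Int)) (cues_trials : List (List Int)) : Prop :=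
  delays_trials.length ≤ cues_trials.length
instance (delays_trials : List (List Int)) (cues_trials : List (List Int)) : Decidable (Pre_make_condition_groups delays_trials cues_trials) := by unfold Pre_make_condition_groups; infer_instance

def pvWitness_make_condition_groups : List (List Int) × List (List Int) :=
  ([[1, 2], [3], [1, 2]], [[5], [6], [5]])

def Spec_make_condition_groups (delays_trials : List (List Int)) (cues_trials : List (List Int)) (out : List (String × List (String × List Int))) : Prop := out = make_condition_groups_alt delays_trials cues_trials
instance (delays_trials : List (List Int)) (cues_trials : List (List Int)) (out : List (String × List (String × List Int))) : Decidable (Spec_make_condition_groups delays_trials cues_trials out) := by unfold Spec_make_condition_groups; infer_instance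

-- ===== CLAIM (what is proved, stated in full; the proofs are below) =====
def Claim_equal_make_condition_groups : Prop := ∀ (delays_trials : List (List Int)) (cues_trials : List (List Int)), Dom_make_condition_groups delays_trials cues_trials → Pre_make_condition_groups delays_trials cues_trials → Spec_make_condition_groups delays_trials cues_trials (make_condition_groups delays_trials cues_trials)

-- ===== LEMMAS AND PROOFS =====

-- the common grouping both programs compute: the cue-dict of one delay condition
def bucket (tr : List (Int × String × String)) (dk : String) : PySem.Dict String (List Int) :=
  (tr.filter (fun t => t.2.1 == dk)).foldl
    (fun d t => d.insert t.2.2 (d.getD t.2.2 [] ++ [t.1])) PySem.Dict.empty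

-- the two key computations agree: str([a, ...])[1:-1] = ", ".join(map(str, [a, ...]))
theorem akey_eq_bkey (l : List Int) : akey l = bkey l := by
  apply String.toList_inj.mp
  rw [akey, PySem.Str.toList_slice, pyStrIntList, PySem.Str.toList_join]
  simp only [List.map_cons, List.map_nil, PySem.Chars.join_cons_cons, PySem.Chars.join_singleton]
  rw [show ("[".toList : List Char) = ['['] from rfl, show ("]".toList : List Char) = [']'] from rfl,
      show ("".toList : List Char) = [] from rfl]
  have : ∀ (cs : List Char), PySem.Chars.slice ('[' :: cs ++ [']']) (some 1) (some (-1)) = cs := by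
    intro cs
    simp [PySem.Chars.slice, PySem.List.slice, PySem.List.clampIdx]
    rw [if_neg (by omega)]
    simp
  simpa [PySem.Str.toList_join, bkey] using
    this (", ".toList.intercalate (List.map String.toList (List.map PySem.Int.toStr l)))

theorem enumerate_map {α β : Type} (f : α → β) (xs : List α) (s : Int) :
    PySem.List.enumerate (xs.map f) s = (PySem.List.enumerate xs s).map (fun p => (p.1, f p.2)) := by
  induction xs generalizing s with
  | nil => simp [PySem.List.enumerate]
  | cons x xs ih => simp [PySem.List.enumerate_cons, ih]

theorem mem_enumerate {α : Type} (xs : List α) (s : Int) (p : Int × α)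
    (hp : p ∈ PySem.List.enumerate xs s) : ∃ k : Nat, ∃ h : k < xs.length, p = (s + k, xs[k]) := by
  induction xs generalizing s with
  | nil => simp [PySem.List.enumerate] at hp
  | cons x xs ih =>
    rw [PySem.List.enumerate_cons] at hp
    rcases List.mem_cons.1 hp with h | h
    · exact ⟨0, by simp, by simp [h]⟩
    · obtain ⟨k, hk, hkeq⟩ := ih (s + 1) h
      exact ⟨k + 1, by simpa using hk, by simp [hkeq]; omega⟩

-- "ensure the cue key exists, then append" collapses to a single insert
theorem stepInner_eq (d : PySem.Dict String (List Int)) (cue : String) (i : Int) :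
    (let d1 := if d.contains cue then d else d.insert cue ([] : List Int);
     d1.insert cue (d1.getD cue [] ++ [i])) = d.insert cue (d.getD cue [] ++ [i]) := by
  by_cases h : d.contains cue
  · simp [h]
  · simp [h, PySem.Dict.insert_insert_self, PySem.Dict.getD_insert_self,
      PySem.Dict.getD_of_not_contains _ _ (by simpa using h)]

-- a loop that only rewrites the entry at dk factors through a fold on that entry
theorem loopA {ν : Type} (P : Int → Bool)
    (T : ν → Int → ν) (dk : String) (idx : List Int)
    (cg : PySem.Dict String ν) (d0 : ν) (dflt : ν) :
    idx.foldl (fun cg i => if P i then cg.insert dk (T (cg.getD dk dflt) i) else cg)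
        (cg.insert dk d0)
      = cg.insert dk (idx.foldl (fun d i => if P i then T d i else d) d0) := by
  induction idx generalizing d0 with
  | nil => simp
  | cons i idx ih =>
    simp only [List.foldl_cons]
    by_cases h : P i
    · simp only [h, if_pos, PySem.Dict.getD_insert_self, PySem.Dict.insert_insert_self, ih]
    · simp [h, ih]

-- lookup after B's modify-fold: only the matching updates apply
theorem getD_foldl_modify_filter {β : Type} (l : List β) (K : β → String)
    (F : β → PySem.Dict String (List Int) → PySem.Dict String (List Int))
    (g : PySem.Dict String (PySem.Dict String (List Int))) (k : String) :
    (l.foldl (fun g p => g.modify (K p) PySem.Dict.empty (fun inner => F p inner)) g).getD k PySem.Dict.empty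
      = (l.filter (fun p => K p == k)).foldl (fun d p => F p d) (g.getD k PySem.Dict.empty) := by
  induction l generalizing g with
  | nil => simp
  | cons p l ih =>
    simp only [List.foldl_cons, List.filter_cons]
    by_cases h : K p = k
    · simp [h, ih]
    · simp [h, ih, PySem.Dict.getD_modify, Ne.symm h]

-- ===== VERDICT (by name: the statement is the Claim_ definition above) =====
theorem make_condition_groups_spec : Claim_equal_make_condition_groups := by
  intro delays cues hdom hpre
  unfold Spec_make_condition_groups
  simp only [make_condition_groups, make_condition_groups_alt, akey_eq_bkey]
  congr 1
  have hpre' : delays.length ≤ cues.length := hpre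
  set ds := List.map (fun i => bkey i) delays with hds
  set cs := List.map (fun i => bkey i) cues with hcs
  have hlen : ds.length ≤ cs.length := by simp [hds, hcs]; omega
  set tr := PySem.List.enumerate (ds.zip cs) 0 with htr
  have hzlen : (ds.zip cs).length = ds.length := by simp [List.length_zip]; omega
  have hF1 : tr.map (fun t => t.1) = PySem.List.pyRange 0 (ds.length : Int) 1 := by
    rw [htr, PySem.List.map_fst_enumerate, hzlen]; norm_num
  have hF2 : ∀ t ∈ tr, PySem.List.pyGetD ds t.1 "" = t.2.1 ∧ PySem.List.pyGetD cs t.1 "" = t.2.2 := by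
    intro t ht
    obtain ⟨k, hk, hkeq⟩ := mem_enumerate _ _ _ ht
    rw [hzlen] at hk
    have hkc : k < cs.length := lt_of_lt_of_le hk hlen
    subst hkeq
    simp only [zero_add, List.getElem_zip]
    constructor
    · rw [PySem.List.pyGetD_natCast, List.getD_eq_getElem _ _ hk]
    · rw [PySem.List.pyGetD_natCast, List.getD_eq_getElem _ _ hkc]
  -- A's per-key fold over all indices is the common bucket
  have hgA : ∀ dk : String,
      (PySem.List.pyRange 0 (ds.length : Int) 1).foldl
        (fun d i => if PySem.List.pyGetD ds i "" == dk then
            d.insert (PySem.List.pyGetD cs i "")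
              (d.getD (PySem.List.pyGetD cs i "") [] ++ [i]) else d) PySem.Dict.empty
      = bucket tr dk := by
    intro dk
    rw [← hF1, List.foldl_map, bucket, List.foldl_filter]
    apply PySem.List.foldl_congr_mem
    intro acc t ht
    obtain ⟨h1, h2⟩ := hF2 t ht
    rw [h1, h2]
  -- A's outer loop inserts each fresh key once
  have houter :
      (PySem.Set.ofList ds).foldl (fun cg idelay_cond =>
        (PySem.List.pyRange 0 (ds.length : Int) 1).foldl
          (innerBody ds cs idelay_cond) (cg.insert idelay_cond PySem.Dict.empty))
        PySem.Dict.empty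
      = (PySem.Set.ofList ds).foldl (fun cg dk => cg.insert dk (bucket tr dk)) PySem.Dict.empty := by
    apply PySem.List.foldl_congr_mem
    intro cg dk hdk
    have hbody : ∀ (cg' : PySem.Dict String (PySem.Dict String (List Int))) (i : Int),
        innerBody ds cs dk cg' i
          = (fun cg' i => if (PySem.List.pyGetD ds i "" == dk) then
              cg'.insert dk
                ((fun d => d.insert (PySem.List.pyGetD cs i "")
                  (d.getD (PySem.List.pyGetD cs i "") [] ++ [i]))
                 (cg'.getD dk PySem.Dict.empty))
              else cg') cg' i := by
      intro cg' i
      simp only [innerBody]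
      by_cases h : (PySem.List.pyGetD ds i "" == dk)
      · simp only [h, if_pos]
        exact congrArg (cg'.insert dk)
          (stepInner_eq (cg'.getD dk PySem.Dict.empty) (PySem.List.pyGetD cs i "") i)
      · simp [h]
    rw [PySem.List.foldl_congr_mem _ _ _ _ (fun acc i _ => hbody acc i),
        loopA (fun i => PySem.List.pyGetD ds i "" == dk)
          (fun d i => d.insert (PySem.List.pyGetD cs i "")
            (d.getD (PySem.List.pyGetD cs i "") [] ++ [i])) dk _ cg PySem.Dict.empty PySem.Dict.empty,
        hgA dk]
  rw [houter]
  -- B's fold, over the key-mapped trials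
  have hBtr :
      (PySem.List.enumerate (delays.zip cues)).foldl (fun g p =>
        g.modify (bkey p.2.1) PySem.Dict.empty
          (fun inner => inner.modify (bkey p.2.2) [] (fun lst => lst ++ [p.1])))
        PySem.Dict.empty
      = tr.foldl (fun g t =>
          g.modify t.2.1 PySem.Dict.empty
            (fun inner => inner.modify t.2.2 [] (fun lst => lst ++ [t.1])))
          PySem.Dict.empty := by
    rw [htr, hds, hcs, List.zip_map, enumerate_map, List.foldl_map]
    rfl
  rw [hBtr]
  set Bd := tr.foldl (fun g t =>
      g.modify t.2.1 PySem.Dict.empty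
        (fun inner => inner.modify t.2.2 [] (fun lst => lst ++ [t.1])))
      PySem.Dict.empty with hBd
  have hBnodup : Bd.keys.Nodup := by
    rw [hBd]
    exact PySem.Dict.nodup_keys_foldl_modify_key tr (fun t => t.2.1) PySem.Dict.empty
      (fun _ t => fun inner => inner.modify t.2.2 [] (fun lst => lst ++ [t.1]))
      PySem.Dict.empty (by simp)
  have hBkeys : Bd.keys = PySem.Set.ofList ds := by
    rw [hBd]
    rw [PySem.Dict.keys_foldl_modify_key tr (fun t => t.2.1) PySem.Dict.empty
      (fun _ t => fun inner => inner.modify t.2.2 [] (fun lst => lst ++ [t.1])) PySem.Dict.empty]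
    have : tr.map (fun t => t.2.1) = ds := by
      rw [show (fun (t : Int × String × String) => t.2.1) = (fun (q : String × String) => q.1) ∘ (fun t => t.2) from rfl,
          ← List.map_map, PySem.List.map_snd_enumerate]
      exact List.map_fst_zip hlen
    rw [this]
    rfl
  have hBget : ∀ dk : String, Bd.getD dk PySem.Dict.empty = bucket tr dk := by
    intro dk
    rw [hBd, getD_foldl_modify_filter tr (fun t => t.2.1)
      (fun t inner => inner.modify t.2.2 [] (fun lst => lst ++ [t.1])) PySem.Dict.empty dk]
    rw [bucket]
    simp only [PySem.Dict.getD_empty]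
    apply PySem.List.foldl_congr_mem
    intro acc t ht
    exact PySem.Dict.ext_iff.mpr rfl
  -- both item lists are the unique delay keys paired with their buckets
  rw [PySem.Dict.items_foldl_insert_fresh (PySem.Set.ofList ds) (fun dk => dk) (fun dk => bucket tr dk)
        PySem.Dict.empty (by simp) (by simp),
      PySem.Dict.items_eq_map_keys Bd hBnodup PySem.Dict.empty, hBkeys]
  simp only [hBget]
  rfl
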